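-- pv_equiv track=rewrite | github.com/bigalxo/AOC2023 | Day 1/Day_1_pt2.py | convert
-- ===== SOURCE A (Python) =====
-- def convert(line): # This function scans the line twice, forwards and backwards, and makes up to two conversions
--     words = ['zero', 'one', 'two', 'three', 'four', 'five', 'six', 'seven', 'eight', 'nine']
--
--     found = False
--     for i in range(len(line)): #scanning the string left to right
--         if found == True:
--             break
--         for word in words:
--             if line [i:].startswith(word):
--                 line = line[:i] + str(words.index(word)) + line[i + len(word):]
--                 found = True
--
--     found = False
--     for i in range(len(line)): #scanning the string right to left
--         if found == True:
--             break
--         i = i*-1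
--         for word in words:
--             if line [i:].startswith(word):
--                 if i + len(word) == 0: #prevents the entire string being rewritten if the end position lands on 0
--                     end = ''
--                 else:
--                     end = line[i + len(word):]
--                 line = line[:i] + str(words.index(word)) + end
--                 found = True
--     return line
-- ===== SOURCE B (Python) =====
-- def convert(line):
--     words = ['zero', 'one', 'two', 'three', 'four', 'five', 'six', 'seven', 'eight', 'nine']
--
--     # first digit-word in the line: one find() per word, keep the leftmost hit
--     best = None
--     for d, w in enumerate(words):
--         p = line.find(w)
--         if p != -1 and (best is None or p < best[0]):
--             best = (p, d, len(w))
--     if best is not None: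
--         p, d, L = best
--         line = line[:p] + str(d) + line[p + L:]
--
--     # last digit-word in the updated line: one rfind() per word, keep the rightmost hit
--     best = None
--     for d, w in enumerate(words):
--         p = line.rfind(w)
--         if p != -1 and (best is None or p > best[0]):
--             best = (p, d, len(w))
--     if best is not None:
--         p, d, L = best
--         line = line[:p] + str(d) + line[p + L:]
--     return line
-- ===== Notes on version B (the rewrite author's own statement) =====
-- stated objective: faster
-- what changed: A scans every position of the line testing all 10 words at each position (nested interpreted loops, twice); B does one find()/rfind() call per word, keeps the leftmost/rightmost hit and splices exactly once per direction.
-- intended difference: On lines where, after the forward and the backward replacement, yet another digit-word with a larger word index starts at the same offset from the right end of the shrunken line, A's backward inner loop keeps splicing extra digits (witness sixnineeight: A gives 698); B makes exactly one replacement per direction (6nine8 there), the intended behaviour of replacing only the first and the last digit-word. — e.g. on convert("sixnineeight"): A returns "698", B returns "6nine8"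
import Mathlib
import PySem

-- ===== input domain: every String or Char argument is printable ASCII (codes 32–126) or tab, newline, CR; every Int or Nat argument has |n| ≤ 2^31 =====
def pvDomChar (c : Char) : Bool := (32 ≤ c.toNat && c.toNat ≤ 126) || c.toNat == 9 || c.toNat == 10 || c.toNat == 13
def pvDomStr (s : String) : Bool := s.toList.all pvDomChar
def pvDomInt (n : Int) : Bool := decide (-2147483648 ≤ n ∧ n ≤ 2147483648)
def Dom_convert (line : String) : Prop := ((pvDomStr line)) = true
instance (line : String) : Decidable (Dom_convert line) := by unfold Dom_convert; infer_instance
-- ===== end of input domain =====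

-- B replaces A's nested position×word scans by one find()/rfind() per word (measured faster) and
-- performs exactly one replacement per direction; on lines where A's backward inner loop keeps
-- splicing after its first replacement (D_convert below) B intentionally differs.


-- ===== PORT A =====
def wordsA : List (List Char) :=
  [['z','e','r','o'], ['o','n','e'], ['t','w','o'], ['t','h','r','e','e'], ['f','o','u','r'],
   ['f','i','v','e'], ['s','i','x'], ['s','e','v','e','n'], ['e','i','g','h','t'], ['n','i','n','e']]

-- one step of the inner `for word in words` loop, forward scan
-- (words.index(word) cannot miss: word ∈ words; getD 0 is never the default)
def innerFwdA (i : Int) (st : List Char × Bool) (w : List Char) : List Char × Bool :=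
  if PySem.Chars.startswith (PySem.List.slice st.1 (some i) none) w then
    (PySem.List.slice st.1 none (some i)
       ++ PySem.Int.toChars (((PySem.List.index? wordsA w).getD 0 : Nat) : Int)
       ++ PySem.List.slice st.1 (some (i + (w.length : Int))) none, true)
  else st

-- one step of the inner loop, backward scan (with A's `i + len(word) == 0` guard)
def innerBwdA (i : Int) (st : List Char × Bool) (w : List Char) : List Char × Bool :=
  if PySem.Chars.startswith (PySem.List.slice st.1 (some i) none) w then
    let e := if i + (w.length : Int) == 0 then ([] : List Char)
             else PySem.List.slice st.1 (some (i + (w.length : Int))) none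
    (PySem.List.slice st.1 none (some i)
       ++ PySem.Int.toChars (((PySem.List.index? wordsA w).getD 0 : Nat) : Int) ++ e, true)
  else st

-- `for i in range(len(line)): if found: break; for word in words: …` (break = skip once found)
def fwdPassA (l : List Char) : List Char × Bool :=
  (PySem.List.pyRange 0 (l.length : Int) 1).foldl
    (fun st i => if st.2 then st else wordsA.foldl (innerFwdA i) st) (l, false)

def bwdPassA (l : List Char) : List Char × Bool :=
  (PySem.List.pyRange 0 (l.length : Int) 1).foldl
    (fun st i => if st.2 then st else wordsA.foldl (innerBwdA (i * -1)) st) (l, false)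

def convert (line : String) : String :=
  String.ofList (bwdPassA (fwdPassA line.toList).1).1

-- ===== PORT B =====
-- line[:p] + str(d) + line[p+L:]
def spliceB (l : List Char) (p d : Int) (L : Nat) : List Char :=
  PySem.List.slice l none (some p) ++ PySem.Int.toChars d
    ++ PySem.List.slice l (some (p + (L : Int))) none

-- best = None; for d, w in enumerate(words): p = line.find(w); keep leftmost hit
def bestFwdB (l : List Char) : Option (Int × Int × Nat) :=
  (PySem.List.enumerate wordsA 0).foldl
    (fun best dw =>
      let p := PySem.Chars.find l dw.2
      if p != -1 && (match best with | none => true | some b => decide (p < b.1)) then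
        some (p, dw.1, dw.2.length)
      else best) none

-- same with rfind, keeping the rightmost hit
def bestBwdB (l : List Char) : Option (Int × Int × Nat) :=
  (PySem.List.enumerate wordsA 0).foldl
    (fun best dw =>
      let p := PySem.Chars.rfind l dw.2
      if p != -1 && (match best with | none => true | some b => decide (b.1 < p)) then
        some (p, dw.1, dw.2.length)
      else best) none

def convert_alt (line : String) : String :=
  let l0 := line.toList
  let l1 := match bestFwdB l0 with
    | none => l0
    | some (p, d, L) => spliceB l0 p d L
  String.ofList (match bestBwdB l1 with
    | none => l1
    | some (p, d, L) => spliceB l1 p d L)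

-- ===== PRECONDITION & SPEC =====
-- On lines where, after the forward and the backward replacement, yet another digit-word with a
-- larger word index starts at the same offset from the right end of the shrunken line, A's backward
-- inner loop keeps splicing extra digits (witness sixnineeight: A gives 698); B makes exactly one
-- replacement per direction (6nine8 there), the intended behaviour of replacing only the first and
-- the last digit-word.
-- (pvMatch = the digit-word starting a string; pvFirstGo/pvLastGo = leftmost/rightmost
--  occurrence with its position; pvSpl = splice a digit over a word)
def pvMatch (l : List Char) : Option Nat :=
  List.findIdx? (·.isPrefixOf l) wordsA

def pvFirstGo : Nat → List Char → Option (Nat × Nat)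
  | _, [] => none
  | i, c :: r => match pvMatch (c :: r) with
      | some d => some (i, d)
      | none => pvFirstGo (i + 1) r

def pvLastGo : Option (Nat × Nat) → Nat → List Char → Option (Nat × Nat)
  | b, _, [] => b
  | b, i, c :: r => pvLastGo ((pvMatch (c :: r)).elim b (fun d => some (i, d))) (i + 1) r

def pvSpl (l : List Char) (x : Nat × Nat) : List Char :=
  l.take x.1 ++ PySem.Int.toChars x.2 ++ l.drop (x.1 + (wordsA.getD x.2 []).length)

def D_convert (line : String) : Prop :=
  (let l1 := (pvFirstGo 0 line.toList).elim line.toList (pvSpl line.toList)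
   (pvLastGo none 0 l1).any fun x =>
     (wordsA.drop (x.2 + 1)).any
       (·.isPrefixOf ((pvSpl l1 x).drop ((pvSpl l1 x).length - (l1.length - x.1))))) = true
instance (line : String) : Decidable (D_convert line) := by unfold D_convert; infer_instance

def Spec_convert (line : String) (out : String) : Prop := ¬ D_convert line → out = convert_alt line
instance (line : String) (out : String) : Decidable (Spec_convert line out) := by unfold Spec_convert; infer_instance

def pvDiffWitness_convert : String := "sixnineeight"
def pvDiffWitnessOut_convert : String × String := ("698", "6nine8")

-- ===== CLAIM (what is proved, stated in full; the proofs are below) =====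
def Claim_unchanged_convert : Prop := ∀ (line : String), Dom_convert line → Spec_convert line (convert line)
def Claim_changed_convert : Prop := Dom_convert (pvDiffWitness_convert) ∧ D_convert (pvDiffWitness_convert) ∧ convert (pvDiffWitness_convert) = pvDiffWitnessOut_convert.1 ∧ convert_alt (pvDiffWitness_convert) = pvDiffWitnessOut_convert.2 ∧ pvDiffWitnessOut_convert.1 ≠ pvDiffWitnessOut_convert.2
def Claim_exact_convert : Prop := ∀ (line : String), Dom_convert line → D_convert line → convert line ≠ convert_alt line

-- ===== LEMMAS AND PROOFS =====

-- proof-side vocabulary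
def wd (t : Nat) : List Char := wordsA.getD t []

-- the (first-listed) digit-word matching at position i, if any
def pvMatchAt (l : List Char) (i : Nat) : Option Nat :=
  List.findIdx? (fun w => w.isPrefixOf (l.drop i)) wordsA

-- replace the word for digit d at position pos by the digit character
def spl (l : List Char) (pos d : Nat) : List Char :=
  l.take pos ++ PySem.Int.toChars (d : Int) ++ l.drop (pos + (wd d).length)

-- earliest match at position ≥ s (fuel = number of positions still to inspect)
def firstFromAux : Nat → List Char → Nat → Option (Nat × Nat)
  | 0, _, _ => none
  | n + 1, l, s => match pvMatchAt l s with
    | some d => some (s, d)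
    | none => firstFromAux n l (s + 1)

def firstFrom (l : List Char) (s : Nat) : Option (Nat × Nat) :=
  firstFromAux (l.length - s) l s

-- latest match at a position in 1..h (checks h first)
def lastIn (l : List Char) : Nat → Option (Nat × Nat)
  | 0 => none
  | j + 1 => match pvMatchAt l (j + 1) with
    | some d => some (j + 1, d)
    | none => lastIn l j

-- the line after the single forward replacement
def pvLine1 (line : String) : List Char :=
  match firstFrom line.toList 0 with
  | none => line.toList
  | some (p, d) => spl line.toList p d

-- no word matches at position 0
def NM0 (l : List Char) : Prop := ∀ w ∈ wordsA, ¬ w <+: l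

lemma firstFrom_stop {l : List Char} {s : Nat} (h : l.length ≤ s) : firstFrom l s = none := by
  unfold firstFrom
  rw [show l.length - s = 0 from by omega]
  rfl

lemma firstFrom_step {l : List Char} {s : Nat} (h : s < l.length) :
    firstFrom l s = match pvMatchAt l s with
      | some d => some (s, d)
      | none => firstFrom l (s + 1) := by
  unfold firstFrom
  rw [show l.length - s = (l.length - (s + 1)) + 1 from by omega]
  rfl

-- the backward cascade of A, semantically: try word indices t,…,9 at offset k from the right
def cspec (l : List Char) (k t : Nat) : List Char :=
  if 10 ≤ t then l
  else if (wd t).isPrefixOf (l.drop (l.length - k)) then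
    cspec (l.take (l.length - k) ++ PySem.Int.toChars (t : Int)
            ++ l.drop (l.length - k + (wd t).length)) k (t + 1)
  else cspec l k (t + 1)
termination_by 10 - t

-- decidable facts about the word table -------------------------------------
lemma wd_ne_nil : ∀ d : Nat, d < 10 → wd d ≠ [] := by decide
lemma wd_mem : ∀ d : Nat, d < 10 → wd d ∈ wordsA := by decide
set_option maxRecDepth 4000 in
lemma wd_inj : ∀ a < 10, ∀ b < 10, wd a = wd b → a = b := by decide
lemma idx_wd : ∀ d : Nat, d < 10 → PySem.List.index? wordsA (wd d) = some d := by decide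
lemma wd_len_ge : ∀ d : Nat, d < 10 → 2 ≤ (wd d).length := by decide

lemma words_nonpre : ∀ w1 ∈ wordsA, ∀ w2 ∈ wordsA, w1 <+: w2 → w1 = w2 := by
  have h : wordsA.all (fun w1 => wordsA.all (fun w2 => !(w1.isPrefixOf w2) || w1 == w2)) = true := by
    decide
  simp only [List.all_eq_true, Bool.or_eq_true, Bool.not_eq_true', beq_iff_eq] at h
  intro w1 h1 w2 h2 hp
  rcases h w1 h1 w2 h2 with h' | h'
  · exact absurd (List.isPrefixOf_iff_prefix.mpr hp) (by simp [h'])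
  · exact h'

lemma words_ne_nil : ∀ w ∈ wordsA, w ≠ [] := by
  have h : wordsA.all (fun w => w != []) = true := by decide
  simp only [List.all_eq_true, bne_iff_ne, ne_eq] at h
  exact h

lemma words_nodigit : ∀ w ∈ wordsA, ∀ c ∈ w, ¬(48 ≤ c.toNat ∧ c.toNat ≤ 57) := by
  have h : wordsA.all (fun w => w.all (fun c => !(48 ≤ c.toNat && c.toNat ≤ 57))) = true := by
    decide
  simp only [List.all_eq_true, Bool.not_eq_true', Bool.and_eq_false_iff,
    decide_eq_false_iff_not, not_le] at h
  intro w hw c hc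
  rcases h w hw c hc with h' | h' <;> omega

lemma toChars_digit : ∀ t : Nat, t < 10 →
    (PySem.Int.toChars (t : Int)).length = 1 ∧
    (PySem.Int.toChars (t : Int)).all (fun c => 48 ≤ c.toNat && c.toNat ≤ 57) = true := by decide

set_option maxRecDepth 4000 in
lemma enumB_spec : ∀ dw ∈ PySem.List.enumerate wordsA 0,
    0 ≤ dw.1 ∧ dw.1 < 10 ∧ dw.2 = wd dw.1.toNat := by decide

-- uniqueness of the match at a position ------------------------------------
lemma match_unique {t w1 w2 : List Char} (h1 : w1 ∈ wordsA) (h2 : w2 ∈ wordsA)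
    (p1 : w1 <+: t) (p2 : w2 <+: t) : w1 = w2 := by
  rcases List.prefix_or_prefix_of_prefix p1 p2 with h | h
  · exact words_nonpre _ h1 _ h2 h
  · exact (words_nonpre _ h2 _ h1 h).symm

-- pvMatchAt characterisations ----------------------------------------------
lemma matchAt_none_iff {l : List Char} {i : Nat} :
    pvMatchAt l i = none ↔ ∀ w ∈ wordsA, ¬ w <+: l.drop i := by
  unfold pvMatchAt
  rw [List.findIdx?_eq_none_iff]
  constructor
  · intro h w hw hp
    have := h w hw
    rw [Bool.eq_false_iff] at this
    exact this (List.isPrefixOf_iff_prefix.mpr hp)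
  · intro h w hw
    rw [Bool.eq_false_iff]
    intro hp
    exact h w hw (List.isPrefixOf_iff_prefix.mp hp)

lemma matchAt_some {l : List Char} {i d : Nat} (h : pvMatchAt l i = some d) :
    d < 10 ∧ wd d <+: l.drop i ∧ ∀ e < d, ¬ wd e <+: l.drop i := by
  unfold pvMatchAt at h
  rw [List.findIdx?_eq_some_iff_getElem] at h
  obtain ⟨hd, hp, hmin⟩ := h
  have hd10 : d < 10 := by simpa [wordsA] using hd
  refine ⟨hd10, ?_, ?_⟩
  · have : wd d = wordsA[d] := List.getD_eq_getElem wordsA [] hd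
    rw [this]
    exact List.isPrefixOf_iff_prefix.mp hp
  · intro e he hpe
    have he' : e < wordsA.length := by omega
    have : wd e = wordsA[e] := List.getD_eq_getElem wordsA [] he'
    exact absurd (List.isPrefixOf_iff_prefix.mpr (this ▸ hpe)) (by simpa using hmin e he)

lemma matchAt_of_prefix {l : List Char} {i d : Nat} (hd : d < 10)
    (h : wd d <+: l.drop i) : pvMatchAt l i = some d := by
  unfold pvMatchAt
  rw [List.findIdx?_eq_some_iff_getElem]
  have hd' : d < wordsA.length := by simpa [wordsA] using hd
  refine ⟨hd', ?_, ?_⟩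
  · rw [← List.getD_eq_getElem wordsA [] hd']
    exact List.isPrefixOf_iff_prefix.mpr h
  · intro j hj
    rw [Bool.not_eq_true, Bool.eq_false_iff]
    intro hp
    have hj10 : j < 10 := by omega
    have hpj : wd j <+: l.drop i := by
      rw [wd, List.getD_eq_getElem wordsA [] (by omega : j < wordsA.length)]
      exact List.isPrefixOf_iff_prefix.mp hp
    have := match_unique (wd_mem j hj10) (wd_mem d hd) hpj h
    exact absurd (wd_inj j hj10 d hd this) (by omega)

lemma matchAt_lt_length {l : List Char} {i d : Nat} (h : pvMatchAt l i = some d) :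
    i < l.length := by
  obtain ⟨hd, hp, -⟩ := matchAt_some h
  by_contra hlen
  have : l.drop i = [] := List.drop_eq_nil_of_le (by omega)
  rw [this, List.prefix_nil] at hp
  exact wd_ne_nil d hd hp

lemma NM0_iff {l : List Char} : NM0 l ↔ pvMatchAt l 0 = none := by
  rw [matchAt_none_iff]
  simp [NM0]

-- NM0 preservation ----------------------------------------------------------
lemma nm0_digit_head (t : Nat) (ht : t < 10) (rest : List Char) :
    NM0 (PySem.Int.toChars (t : Int) ++ rest) := by
  obtain ⟨hlen, hall⟩ := toChars_digit t ht
  obtain ⟨c, hc⟩ := List.length_eq_one_iff.mp hlen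
  rw [hc]
  intro w hw hp
  have hwne : w ≠ [] := by
    intro he
    exact absurd (he ▸ hw) (by decide)
  obtain ⟨a, w', rfl⟩ := List.exists_cons_of_ne_nil hwne
  rw [List.cons_append] at hp
  have ha : a = c := (List.cons_prefix_cons.mp hp).1
  have hcd : 48 ≤ c.toNat ∧ c.toNat ≤ 57 := by
    have := List.all_eq_true.mp hall c (by simp [hc])
    simpa using this
  exact words_nodigit _ hw a (by simp) (ha ▸ hcd)

lemma nm0_splice {l : List Char} {pos q t : Nat} (h0 : NM0 l) (ht : t < 10)
    (h1 : 1 ≤ pos) (h2 : pos ≤ l.length) :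
    NM0 (l.take pos ++ PySem.Int.toChars (t : Int) ++ l.drop q) := by
  obtain ⟨hlen, hall⟩ := toChars_digit t ht
  obtain ⟨c, hc⟩ := List.length_eq_one_iff.mp hlen
  intro w hw hp
  by_cases hwl : w.length ≤ pos
  · -- w is a prefix of l.take pos, hence of l
    have hxlen : (l.take pos).length = pos := by simp [Nat.min_eq_left h2]
    have heq : w = (l.take pos).take w.length := by
      have h' := List.prefix_iff_eq_take.mp hp
      rw [List.append_assoc, List.take_append_of_le_length (by omega)] at h'
      exact h'
    have h1 : w <+: l.take pos := heq ▸ List.take_prefix _ _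
    exact h0 w hw (h1.trans (List.take_prefix pos l))
  · -- w sees the digit character at index pos
    rw [Nat.not_le] at hwl
    rw [hc] at hp
    have hxlen : (l.take pos).length = pos := by
      simp [Nat.min_eq_left h2]
    have hwp : w[pos]'(hwl) = c := by
      have hg := hp.getElem hwl
      rw [hg]
      simp [hxlen]
    have hcd : 48 ≤ c.toNat ∧ c.toNat ≤ 57 := by
      have := List.all_eq_true.mp hall c (by simp [hc])
      simpa using this
    exact words_nodigit _ hw _ (List.getElem_mem hwl) (hwp ▸ hcd)

-- generic fold helpers ------------------------------------------------------
lemma foldl_outer_skip {ι : Type} (f : List Char × Bool → ι → List Char × Bool)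
    (js : List ι) (st : List Char × Bool) (h : st.2 = true) :
    js.foldl (fun st i => if st.2 then st else f st i) st = st := by
  induction js with
  | nil => rfl
  | cons a as ih => simpa [h] using ih

lemma foldl_inner_fwd_skip (i : Int) (ws : List (List Char)) (st : List Char × Bool)
    (h : ∀ w ∈ ws, ¬ PySem.Chars.startswith (PySem.List.slice st.1 (some i) none) w) :
    ws.foldl (innerFwdA i) st = st := by
  induction ws with
  | nil => rfl
  | cons w ws ih =>
    have h1 : innerFwdA i st w = st := by
      unfold innerFwdA
      simp [h w (by simp)]
    rw [List.foldl_cons, h1]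
    exact ih (fun w' hw' => h w' (by simp [hw']))

lemma foldl_inner_bwd_skip (i : Int) (ws : List (List Char)) (st : List Char × Bool)
    (h : ∀ w ∈ ws, ¬ PySem.Chars.startswith (PySem.List.slice st.1 (some i) none) w) :
    ws.foldl (innerBwdA i) st = st := by
  induction ws with
  | nil => rfl
  | cons w ws ih =>
    have h1 : innerBwdA i st w = st := by
      unfold innerBwdA
      simp [h w (by simp)]
    rw [List.foldl_cons, h1]
    exact ih (fun w' hw' => h w' (by simp [hw']))

-- translation helpers --------------------------------------------------------
lemma startswith_slice_nat (l w : List Char) (i : Nat) :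
    PySem.Chars.startswith (PySem.List.slice l (some (i : Int)) none) w = true ↔ w <+: l.drop i := by
  rw [PySem.List.slice_from_natCast, PySem.Chars.startswith_iff]

lemma startswith_slice_neg (l w : List Char) (k : Nat) (hk : 1 ≤ k) :
    PySem.Chars.startswith (PySem.List.slice l (some (-(k : Int))) none) w = true
      ↔ w <+: l.drop (l.length - k) := by
  rw [PySem.List.slice_from_neg_natCast l k (by omega), PySem.Chars.startswith_iff]

lemma drop_spl (l : List Char) (pos d q : Nat) (h : pos ≤ l.length) :
    (l.take pos ++ PySem.Int.toChars (d : Int) ++ l.drop q).drop pos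
      = PySem.Int.toChars (d : Int) ++ l.drop q := by
  rw [List.append_assoc, List.drop_append_of_le_length (by simp; omega)]
  simp [Nat.min_eq_left h]

-- forward pass of A ----------------------------------------------------------
lemma inner_match_fwd {l : List Char} {i d : Nat} (h : pvMatchAt l i = some d) :
    wordsA.foldl (innerFwdA (i : Int)) (l, false) = (spl l i d, true) := by
  obtain ⟨hd, hp, hmin⟩ := matchAt_some h
  have hil : i < l.length := matchAt_lt_length h
  have hsplit : wordsA = wordsA.take d ++ wd d :: wordsA.drop (d + 1) := by
    conv_lhs => rw [← List.take_append_drop d wordsA]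
    rw [List.drop_eq_getElem_cons (by simpa [wordsA] using hd)]
    rw [← List.getD_eq_getElem wordsA [] (by simpa [wordsA] using hd)]
    rfl
  rw [hsplit, List.foldl_append, List.foldl_cons]
  have htake : (wordsA.take d).foldl (innerFwdA (i : Int)) (l, false) = (l, false) := by
    apply foldl_inner_fwd_skip
    intro w hw
    rw [List.mem_take_iff_getElem] at hw
    obtain ⟨j, hj, rfl⟩ := hw
    have hj10 : j < d := by simp [wordsA] at hj; omega
    have : wordsA[j] = wd j := by
      rw [wd, List.getD_eq_getElem wordsA [] (by simp [wordsA]; omega)]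
    rw [this]
    intro hs
    exact hmin j hj10 ((startswith_slice_nat l (wd j) i).mp hs)
  rw [htake]
  have hstep : innerFwdA (i : Int) (l, false) (wd d) = (spl l i d, true) := by
    unfold innerFwdA
    rw [if_pos (by exact (startswith_slice_nat l (wd d) i).mpr hp)]
    simp only [spl]
    rw [idx_wd d hd]
    rw [PySem.List.slice_to_natCast]
    have : (i : Int) + ((wd d).length : Int) = ((i + (wd d).length : Nat) : Int) := by push_cast; ring
    rw [this, PySem.List.slice_from_natCast]
    rfl
  rw [hstep]
  apply foldl_inner_fwd_skip
  intro w hw hs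
  have hw' : w ∈ wordsA := by
    have := List.drop_subset (d+1) wordsA
    exact this hw
  have hdr : (spl l i d).drop i = PySem.Int.toChars (d : Int) ++ l.drop (i + (wd d).length) := by
    unfold spl
    exact drop_spl l i d _ (by omega)
  rw [startswith_slice_nat] at hs
  rw [hdr] at hs
  exact nm0_digit_head d hd _ w hw' hs

lemma fwd_go (l : List Char) (m s : Nat) (hm : s + m = l.length) :
    (List.range' s m).foldl
      (fun st (j : Nat) => if st.2 then st else wordsA.foldl (innerFwdA (j : Int)) st) (l, false)
    = match firstFrom l s with
      | none => (l, false)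
      | some (p, d) => (spl l p d, true) := by
  induction m generalizing s with
  | zero =>
    have hs : s = l.length := by omega
    rw [firstFrom_stop (by omega)]
    rfl
  | succ m ih =>
    have hs : s < l.length := by omega
    rw [List.range'_succ, List.foldl_cons]
    simp only [Bool.false_eq_true, if_false]
    cases hma : pvMatchAt l s with
    | none =>
      have hskip : wordsA.foldl (innerFwdA (s : Int)) (l, false) = (l, false) := by
        apply foldl_inner_fwd_skip
        intro w hw hsw
        exact (matchAt_none_iff.mp hma) w hw ((startswith_slice_nat l w s).mp hsw)
      have hff : firstFrom l s = firstFrom l (s + 1) := by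
        rw [firstFrom_step (by omega), hma]
      rw [hskip, ih (s + 1) (by omega), hff]
    | some d =>
      rw [inner_match_fwd hma]
      rw [foldl_outer_skip _ _ _ rfl]
      have hff : firstFrom l s = some (s, d) := by
        rw [firstFrom_step (by omega), hma]
      rw [hff]

lemma fwdPassA_eq (l : List Char) :
    fwdPassA l = match firstFrom l 0 with
      | none => (l, false)
      | some (p, d) => (spl l p d, true) := by
  unfold fwdPassA
  rw [PySem.List.pyRange_zero_natCast, List.foldl_map, List.range_eq_range']
  exact fwd_go l l.length 0 (by omega)

-- the line after the forward pass has no word at position 0 ------------------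
lemma nm0_spl {l : List Char} {p d : Nat} (h : pvMatchAt l p = some d)
    (hmin : ∀ q < p, pvMatchAt l q = none) : NM0 (spl l p d) := by
  obtain ⟨hd, hp, -⟩ := matchAt_some h
  rcases Nat.eq_zero_or_pos p with rfl | hpos
  · unfold spl
    simp only [List.take_zero, List.nil_append]
    exact nm0_digit_head d hd _
  · have h0 : NM0 l := by
      apply NM0_iff.mpr
      exact hmin 0 hpos
    exact nm0_splice h0 hd hpos (by have := matchAt_lt_length h; omega)

-- cspec unfolding helpers ----------------------------------------------------
lemma cspec_stop {l : List Char} {k t : Nat} (h : 10 ≤ t) : cspec l k t = l := by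
  rw [cspec]
  simp [h]

lemma cspec_hit {l : List Char} {k t : Nat} (h : t < 10)
    (hm : (wd t).isPrefixOf (l.drop (l.length - k))) :
    cspec l k t = cspec (l.take (l.length - k) ++ PySem.Int.toChars (t : Int)
      ++ l.drop (l.length - k + (wd t).length)) k (t + 1) := by
  rw [cspec]
  simp [Nat.not_le.mpr h, hm]

lemma cspec_miss {l : List Char} {k t : Nat} (h : t < 10)
    (hm : ¬ (wd t).isPrefixOf (l.drop (l.length - k))) :
    cspec l k t = cspec l k (t + 1) := by
  rw [cspec]
  simp [Nat.not_le.mpr h, hm]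

lemma cspec_skip {l : List Char} {k : Nat} (t u : Nat) (htu : t ≤ u) (hu : u ≤ 10)
    (h : ∀ v, t ≤ v → v < u → ¬ (wd v).isPrefixOf (l.drop (l.length - k))) :
    cspec l k t = cspec l k u := by
  obtain ⟨n, hn⟩ : ∃ n, u - t = n := ⟨u - t, rfl⟩
  induction n generalizing t with
  | zero => have : t = u := by omega
            rw [this]
  | succ n ih =>
    have htu' : t < u := by omega
    rw [cspec_miss (by omega) (h t le_rfl htu')]
    exact ih (t+1) (by omega) (fun v hv1 hv2 => h v (by omega) hv2) (by omega)

-- backward pass of A ---------------------------------------------------------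
set_option maxRecDepth 4000 in
lemma drop_words : ∀ t : Nat, t < 10 → wordsA.drop t = wd t :: wordsA.drop (t + 1) := by decide

-- one matching inner step of the backward loop
lemma innerBwd_step {l : List Char} {k t : Nat} (b : Bool) (h0 : NM0 l) (ht : t < 10)
    (hk1 : 1 ≤ k) (hm : wd t <+: l.drop (l.length - k)) :
    innerBwdA (-(k : Int)) (l, b) (wd t)
      = (l.take (l.length - k) ++ PySem.Int.toChars (t : Int)
          ++ l.drop (l.length - k + (wd t).length), true) := by
  have hkl : k < l.length := by
    by_contra hkl
    have : l.length - k = 0 := by omega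
    rw [this, List.drop_zero] at hm
    exact h0 _ (wd_mem t ht) hm
  have hL : (wd t).length ≤ k := by
    have := hm.length_le
    rw [List.length_drop] at this
    omega
  unfold innerBwdA
  rw [if_pos ((startswith_slice_neg l (wd t) k hk1).mpr hm)]
  simp only [idx_wd t ht, Option.getD_some]
  rw [PySem.List.slice_to_neg_natCast l k (by omega)]
  rcases Nat.eq_or_lt_of_le hL with hLk | hLk
  · -- word reaches the end of the line: the i + len(word) == 0 guard fires
    have hbeq : (-(k : Int) + ((wd t).length : Int) == 0) = true := by
      simp [← hLk]
    rw [hbeq]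
    simp only [if_true]
    have : l.drop (l.length - k + (wd t).length) = [] := by
      apply List.drop_eq_nil_of_le
      omega
    rw [this]
  · have hbeq : (-(k : Int) + ((wd t).length : Int) == 0) = false := by
      simp
      omega
    rw [hbeq]
    simp only [Bool.false_eq_true, if_false]
    have hcast : -(k : Int) + ((wd t).length : Int) = -(((k - (wd t).length : Nat)) : Int) := by
      push_cast [Nat.cast_sub (by omega : (wd t).length ≤ k)]
      ring
    rw [hcast, PySem.List.slice_from_neg_natCast l (k - (wd t).length) (by omega)]
    have : l.length - (k - (wd t).length) = l.length - k + (wd t).length := by omega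
    rw [this]

lemma rest_bwd (k : Nat) (hk1 : 1 ≤ k) :
    ∀ t l, t ≤ 10 → NM0 l →
      (wordsA.drop t).foldl (innerBwdA (-(k : Int))) (l, true) = (cspec l k t, true) := by
  suffices H : ∀ n t l, 10 - t = n → t ≤ 10 → NM0 l →
      (wordsA.drop t).foldl (innerBwdA (-(k : Int))) (l, true) = (cspec l k t, true) by
    intro t l ht h0
    exact H _ t l rfl ht h0
  intro n
  induction n with
  | zero =>
    intro t l hn ht h0
    have : t = 10 := by omega
    subst this
    rw [show wordsA.drop 10 = [] from rfl, List.foldl_nil, cspec_stop le_rfl]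
  | succ n ih =>
    intro t l hn ht h0
    have ht10 : t < 10 := by omega
    rw [drop_words t ht10, List.foldl_cons]
    by_cases hm : wd t <+: l.drop (l.length - k)
    · rw [innerBwd_step true h0 ht10 hk1 hm]
      have hkl : k < l.length := by
        by_contra hkl
        rw [show l.length - k = 0 from by omega, List.drop_zero] at hm
        exact h0 _ (wd_mem t ht10) hm
      have h0' : NM0 (l.take (l.length - k) ++ PySem.Int.toChars (t : Int)
          ++ l.drop (l.length - k + (wd t).length)) :=
        nm0_splice h0 ht10 (by omega) (by omega)
      rw [ih (t + 1) _ (by omega) (by omega) h0']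
      rw [cspec_hit ht10 (List.isPrefixOf_iff_prefix.mpr hm)]
    · have hstep : innerBwdA (-(k : Int)) (l, true) (wd t) = (l, true) := by
        unfold innerBwdA
        rw [if_neg (by
          intro hc
          exact hm ((startswith_slice_neg l (wd t) k hk1).mp hc))]
      rw [hstep, ih (t + 1) l (by omega) (by omega) h0]
      rw [cspec_miss ht10 (by
        intro hc
        exact hm (List.isPrefixOf_iff_prefix.mp hc))]

lemma inner_match_bwd {l : List Char} {k d : Nat} (h0 : NM0 l) (hk1 : 1 ≤ k)
    (hk : k < l.length) (h : pvMatchAt l (l.length - k) = some d) :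
    wordsA.foldl (innerBwdA (-(k : Int))) (l, false) = (cspec l k d, true) := by
  obtain ⟨hd, hp, hmin⟩ := matchAt_some h
  have hsplit : wordsA = wordsA.take d ++ wd d :: wordsA.drop (d + 1) := by
    conv_lhs => rw [← List.take_append_drop d wordsA]
    rw [List.drop_eq_getElem_cons (by simpa [wordsA] using hd)]
    rw [← List.getD_eq_getElem wordsA [] (by simpa [wordsA] using hd)]
    rfl
  rw [hsplit, List.foldl_append, List.foldl_cons]
  have htake : (wordsA.take d).foldl (innerBwdA (-(k : Int))) (l, false) = (l, false) := by
    apply foldl_inner_bwd_skip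
    intro w hw
    rw [List.mem_take_iff_getElem] at hw
    obtain ⟨j, hj, rfl⟩ := hw
    have hj10 : j < d := by simp [wordsA] at hj; omega
    have hwj : wordsA[j] = wd j := by
      rw [wd, List.getD_eq_getElem wordsA [] (by simp [wordsA]; omega)]
    rw [hwj]
    intro hs
    exact hmin j hj10 ((startswith_slice_neg l (wd j) k hk1).mp hs)
  rw [htake, innerBwd_step false h0 hd hk1 hp]
  have h0' : NM0 (l.take (l.length - k) ++ PySem.Int.toChars (d : Int)
      ++ l.drop (l.length - k + (wd d).length)) :=
    nm0_splice h0 hd (by omega) (by omega)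
  rw [rest_bwd k hk1 (d + 1) _ (by omega) h0']
  rw [cspec_hit hd (List.isPrefixOf_iff_prefix.mpr hp)]

lemma bwd_go (l : List Char) (m j : Nat) (hj : 1 ≤ j) (hm : j + m = l.length) (h0 : NM0 l) :
    (List.range' j m).foldl
      (fun st (j' : Nat) => if st.2 then st else wordsA.foldl (innerBwdA ((j' : Int) * -1)) st)
      (l, false)
    = match lastIn l (l.length - j) with
      | none => (l, false)
      | some (p, d) => (cspec l (l.length - p) d, true) := by
  induction m generalizing j with
  | zero =>
    have : l.length - j = 0 := by omega
    rw [this]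
    rfl
  | succ m ih =>
    have hjl : j < l.length := by omega
    rw [List.range'_succ, List.foldl_cons]
    simp only [Bool.false_eq_true, if_false]
    have hneg : ((j : Nat) : Int) * -1 = -(j : Int) := by ring
    rw [hneg]
    cases hma : pvMatchAt l (l.length - j) with
    | none =>
      have hskip : wordsA.foldl (innerBwdA (-(j : Int))) (l, false) = (l, false) := by
        apply foldl_inner_bwd_skip
        intro w hw hsw
        exact (matchAt_none_iff.mp hma) w hw ((startswith_slice_neg l w j hj).mp hsw)
      rw [hskip, ih (j + 1) (by omega) (by omega)]
      rw [show l.length - j = (l.length - (j + 1)) + 1 from by omega, lastIn]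
      rw [show l.length - (j + 1) + 1 = l.length - j from by omega, hma]
    | some d =>
      rw [inner_match_bwd h0 hj hjl hma]
      rw [foldl_outer_skip _ _ _ rfl]
      rw [show l.length - j = (l.length - (j + 1)) + 1 from by omega, lastIn]
      rw [show l.length - (j + 1) + 1 = l.length - j from by omega, hma]
      show (cspec l j d, true) = (cspec l (l.length - (l.length - j)) d, true)
      rw [show l.length - (l.length - j) = j from by omega]

lemma bwdPassA_eq (l : List Char) (h0 : NM0 l) :
    bwdPassA l = match lastIn l (l.length - 1) with
      | none => (l, false)
      | some (p, d) => (cspec l (l.length - p) d, true) := by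
  unfold bwdPassA
  rw [PySem.List.pyRange_zero_natCast, List.foldl_map, List.range_eq_range']
  by_cases hl0 : l.length = 0
  · rw [hl0]
    rfl
  · conv_lhs => rw [show l.length = (l.length - 1) + 1 from by omega]
    rw [List.range'_succ, List.foldl_cons]
    simp only [Bool.false_eq_true, if_false]
    have hstep : wordsA.foldl (innerBwdA (((0 : Nat) : Int) * -1)) (l, false) = (l, false) := by
      apply foldl_inner_bwd_skip
      intro w hw hsw
      apply h0 w hw
      rw [show ((0 : Nat) : Int) * -1 = ((0 : Nat) : Int) from by ring] at hsw
      rw [PySem.List.slice_from_natCast, List.drop_zero, PySem.Chars.startswith_iff] at hsw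
      exact hsw
    rw [hstep]
    exact bwd_go l (l.length - 1) 1 le_rfl (by omega) h0

-- B-side fold step functions (definitionally the lambdas in bestFwdB/bestBwdB)
def fstepF (l : List Char) (best : Option (Int × Int × Nat)) (dw : Int × List Char) :
    Option (Int × Int × Nat) :=
  let p := PySem.Chars.find l dw.2
  if p != -1 && (match best with | none => true | some b => decide (p < b.1)) then
    some (p, dw.1, dw.2.length)
  else best

def fstepB (l : List Char) (best : Option (Int × Int × Nat)) (dw : Int × List Char) :
    Option (Int × Int × Nat) :=
  let p := PySem.Chars.rfind l dw.2
  if p != -1 && (match best with | none => true | some b => decide (b.1 < p)) then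
    some (p, dw.1, dw.2.length)
  else best

lemma bestFwdB_eq (l : List Char) :
    bestFwdB l = (PySem.List.enumerate wordsA 0).foldl (fstepF l) none := rfl

lemma bestBwdB_eq (l : List Char) :
    bestBwdB l = (PySem.List.enumerate wordsA 0).foldl (fstepB l) none := rfl

lemma fstepF_some (l : List Char) (b : Int × Int × Nat) (dw : Int × List Char) :
    fstepF l (some b) dw
      = if PySem.Chars.find l dw.2 != -1 && decide (PySem.Chars.find l dw.2 < b.1) then
          some (PySem.Chars.find l dw.2, dw.1, dw.2.length)
        else some b := rfl

lemma fstepF_none (l : List Char) (dw : Int × List Char) :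
    fstepF l none dw
      = if PySem.Chars.find l dw.2 != -1 then some (PySem.Chars.find l dw.2, dw.1, dw.2.length)
        else none := by
  unfold fstepF
  simp

lemma fstepB_some (l : List Char) (b : Int × Int × Nat) (dw : Int × List Char) :
    fstepB l (some b) dw
      = if PySem.Chars.rfind l dw.2 != -1 && decide (b.1 < PySem.Chars.rfind l dw.2) then
          some (PySem.Chars.rfind l dw.2, dw.1, dw.2.length)
        else some b := rfl

lemma fstepB_none (l : List Char) (dw : Int × List Char) :
    fstepB l none dw
      = if PySem.Chars.rfind l dw.2 != -1 then some (PySem.Chars.rfind l dw.2, dw.1, dw.2.length)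
        else none := by
  unfold fstepB
  simp

lemma mem_wd : ∀ w ∈ wordsA, ∃ E, E < 10 ∧ w = wd E := by
  intro w hw
  rw [List.mem_iff_getElem] at hw
  obtain ⟨i, hi, rfl⟩ := hw
  exact ⟨i, by simpa [wordsA] using hi, (List.getD_eq_getElem wordsA [] hi).symm⟩

lemma enum_mem : ∀ E : Nat, E < 10 → ((E : Int), wd E) ∈ PySem.List.enumerate wordsA 0 := by decide

-- B: characterising the min/max folds ---------------------------------------
lemma occ_isInfix {l w : List Char} {q : Nat} (h : w <+: l.drop q) : w <:+: l := by
  exact h.isInfix.trans (List.drop_suffix q l).isInfix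

lemma find_bounds {l w : List Char} {q : Nat} (hw : w <+: l.drop q) :
    0 ≤ PySem.Chars.find l w ∧ (PySem.Chars.find l w).toNat ≤ q := by
  have hinf : w <:+: l := occ_isInfix hw
  have hne : PySem.Chars.find l w ≠ -1 := (PySem.Chars.find_ne_neg_one_iff l w).mpr hinf
  have hge : -1 ≤ PySem.Chars.find l w := PySem.Chars.neg_one_le_find l w
  have h0 : 0 ≤ PySem.Chars.find l w := by omega
  obtain ⟨-, hmin⟩ := PySem.Chars.find_spec h0
  refine ⟨h0, ?_⟩
  by_contra hq
  exact hmin q (by omega) hw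

lemma bestFwd_mono (l : List Char) (ps : List (Int × List Char)) :
    ∀ b : Int × Int × Nat, ∃ c, ps.foldl (fstepF l) (some b) = some c ∧ c.1 ≤ b.1 := by
  induction ps with
  | nil => exact fun b => ⟨b, rfl, le_rfl⟩
  | cons dw ps ih =>
    intro b
    rw [List.foldl_cons, fstepF_some]
    by_cases hc : (PySem.Chars.find l dw.2 != -1 && decide (PySem.Chars.find l dw.2 < b.1)) = true
    · rw [if_pos hc]
      obtain ⟨c, h1, h2⟩ := ih (PySem.Chars.find l dw.2, dw.1, dw.2.length)
      refine ⟨c, h1, ?_⟩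
      simp only [Bool.and_eq_true, decide_eq_true_eq] at hc
      omega
    · rw [if_neg hc]
      exact ih b

-- soundness: any `some` the fold produces names a real word and its find value
lemma bestFwd_sound (l : List Char) (ps : List (Int × List Char))
    (hps : ∀ dw ∈ ps, 0 ≤ dw.1 ∧ dw.1 < 10 ∧ dw.2 = wd dw.1.toNat) :
    ∀ acc, (acc = none ∨ ∃ D : Nat, D < 10 ∧
        acc = some (PySem.Chars.find l (wd D), (D : Int), (wd D).length) ∧
        PySem.Chars.find l (wd D) ≠ -1) →
      (ps.foldl (fstepF l) acc = none ∨ ∃ D : Nat, D < 10 ∧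
        ps.foldl (fstepF l) acc = some (PySem.Chars.find l (wd D), (D : Int), (wd D).length) ∧
        PySem.Chars.find l (wd D) ≠ -1) := by
  induction ps with
  | nil => exact fun acc h => h
  | cons dw ps ih =>
    intro acc hacc
    rw [List.foldl_cons]
    apply ih (fun e he => hps e (by simp [he]))
    obtain ⟨h0, h10, hw⟩ := hps dw (by simp)
    have hD : dw.1 = ((dw.1.toNat : Nat) : Int) := by omega
    rcases hacc with rfl | ⟨D, hD10, rfl, hne⟩
    · rw [fstepF_none]
      by_cases hc : (PySem.Chars.find l dw.2 != -1) = true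
      · rw [if_pos hc]
        refine Or.inr ⟨dw.1.toNat, by omega, ?_, by rw [← hw]; simpa using hc⟩
        rw [← hw, ← hD]
      · rw [if_neg hc]
        exact Or.inl rfl
    · rw [fstepF_some]
      by_cases hc : (PySem.Chars.find l dw.2 != -1 &&
          decide (PySem.Chars.find l dw.2 < PySem.Chars.find l (wd D))) = true
      · rw [if_pos hc]
        simp only [Bool.and_eq_true, bne_iff_ne, ne_eq] at hc
        refine Or.inr ⟨dw.1.toNat, by omega, ?_, by rw [← hw]; exact hc.1⟩
        rw [← hw, ← hD]
      · rw [if_neg hc]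
        exact Or.inr ⟨D, hD10, rfl, hne⟩

-- completeness: the fold result is at most any present find value
lemma bestFwd_complete (l : List Char) (ps : List (Int × List Char)) :
    ∀ acc dw, dw ∈ ps → PySem.Chars.find l dw.2 ≠ -1 →
      ∃ c, ps.foldl (fstepF l) acc = some c ∧ c.1 ≤ PySem.Chars.find l dw.2 := by
  induction ps with
  | nil => intro _ _ h; exact absurd h (by simp)
  | cons e ps ih =>
    intro acc dw hdw hne
    rw [List.foldl_cons]
    rcases List.mem_cons.mp hdw with rfl | hdw'
    · -- dw is the head: after this step the accumulator is ≤ find dw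
      cases acc with
      | none =>
        rw [fstepF_none, if_pos (by simpa using hne)]
        obtain ⟨c, h1, h2⟩ := bestFwd_mono l ps (PySem.Chars.find l dw.2, dw.1, dw.2.length)
        exact ⟨c, h1, h2⟩
      | some b =>
        rw [fstepF_some]
        by_cases hc : (PySem.Chars.find l dw.2 != -1 &&
            decide (PySem.Chars.find l dw.2 < b.1)) = true
        · rw [if_pos hc]
          obtain ⟨c, h1, h2⟩ := bestFwd_mono l ps (PySem.Chars.find l dw.2, dw.1, dw.2.length)
          exact ⟨c, h1, h2⟩
        · rw [if_neg hc]
          simp only [Bool.and_eq_true, bne_iff_ne, ne_eq, decide_eq_true_eq, not_and, not_lt] at hc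
          obtain ⟨c, h1, h2⟩ := bestFwd_mono l ps b
          exact ⟨c, h1, by have := hc hne; omega⟩
    · exact ih _ dw hdw' hne

lemma bestFwd_some {l : List Char} {p dI : Int} {L : Nat}
    (h : bestFwdB l = some (p, dI, L)) :
    ∃ D : Nat, dI = (D : Int) ∧ D < 10 ∧ L = (wd D).length ∧ 0 ≤ p ∧
      pvMatchAt l p.toNat = some D ∧ ∀ q < p.toNat, pvMatchAt l q = none := by
  rw [bestFwdB_eq] at h
  have hsound := bestFwd_sound l (PySem.List.enumerate wordsA 0) enumB_spec none (Or.inl rfl)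
  rw [h] at hsound
  rcases hsound with hbad | ⟨D, hD10, heq, hne⟩
  · exact absurd hbad (by simp)
  · simp only [Option.some.injEq, Prod.mk.injEq] at heq
    obtain ⟨hp, hdI, hL⟩ := heq
    have h0p : 0 ≤ p := by
      have := PySem.Chars.neg_one_le_find l (wd D)
      omega
    have hfs := PySem.Chars.find_spec (s := l) (sub := wd D) (by rw [← hp]; exact h0p)
    rw [← hp] at hfs
    obtain ⟨hpre, hmin⟩ := hfs
    refine ⟨D, hdI, hD10, hL, h0p, matchAt_of_prefix hD10 hpre, ?_⟩
    intro q hq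
    apply matchAt_none_iff.mpr
    intro w hw hpw
    obtain ⟨E, hE10, rfl⟩ := mem_wd w hw
    have hneE : PySem.Chars.find l (wd E) ≠ -1 :=
      (PySem.Chars.find_ne_neg_one_iff l (wd E)).mpr (occ_isInfix hpw)
    obtain ⟨c, hc1, hc2⟩ := bestFwd_complete l (PySem.List.enumerate wordsA 0) none
      ((E : Int), wd E) (enum_mem E hE10) hneE
    rw [h] at hc1
    obtain ⟨hfb, -⟩ := find_bounds hpw
    simp only [Option.some.injEq] at hc1
    have hcp : c.1 = p := by rw [← hc1]
    have hc2' : c.1 ≤ PySem.Chars.find l (wd E) := hc2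
    obtain ⟨-, hle⟩ := find_bounds hpw
    omega

lemma bestFwd_none {l : List Char} (h : bestFwdB l = none) :
    ∀ q, pvMatchAt l q = none := by
  intro q
  apply matchAt_none_iff.mpr
  intro w hw hpw
  obtain ⟨E, hE10, rfl⟩ := mem_wd w hw
  have hneE : PySem.Chars.find l (wd E) ≠ -1 :=
    (PySem.Chars.find_ne_neg_one_iff l (wd E)).mpr (occ_isInfix hpw)
  obtain ⟨c, hc1, -⟩ := bestFwd_complete l (PySem.List.enumerate wordsA 0) none
    ((E : Int), wd E) (enum_mem E hE10) hneE
  rw [bestFwdB_eq] at h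
  rw [h] at hc1
  exact absurd hc1 (by simp)

lemma rfind_go_spec (s sub : List Char) (j : Nat) :
    (PySem.Chars.rfind.go s sub j = -1 ∧ ∀ i ≤ j, ¬ sub <+: s.drop i) ∨
    (∃ q : Nat, PySem.Chars.rfind.go s sub j = (q : Int) ∧ q ≤ j ∧ sub <+: s.drop q ∧
      ∀ i, q < i → i ≤ j → ¬ sub <+: s.drop i) := by
  induction j with
  | zero =>
    rw [PySem.Chars.rfind.go]
    by_cases hp : sub.isPrefixOf s = true
    · right
      refine ⟨0, by simp [hp], le_rfl,
        by simpa [List.drop_zero] using List.isPrefixOf_iff_prefix.mp hp, by omega⟩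
    · left
      refine ⟨by simp [hp], ?_⟩
      intro i hi hpi
      have : i = 0 := by omega
      subst this
      rw [List.drop_zero] at hpi
      exact hp (List.isPrefixOf_iff_prefix.mpr hpi)
  | succ j ih =>
    rw [PySem.Chars.rfind.go]
    by_cases hp : sub.isPrefixOf (s.drop (j + 1)) = true
    · right
      exact ⟨j + 1, by simp [hp], le_rfl, List.isPrefixOf_iff_prefix.mp hp, by omega⟩
    · rcases ih with ⟨h1, h2⟩ | ⟨q, h1, h2, h3, h4⟩
      · left
        refine ⟨by simp [hp, h1], ?_⟩
        intro i hi hpi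
        rcases Nat.eq_or_lt_of_le hi with rfl | hi'
        · exact hp (List.isPrefixOf_iff_prefix.mpr hpi)
        · exact h2 i (by omega) hpi
      · right
        refine ⟨q, by simp [hp, h1], by omega, h3, ?_⟩
        intro i hqi hij
        rcases Nat.eq_or_lt_of_le hij with rfl | hi'
        · exact fun hpi => hp (List.isPrefixOf_iff_prefix.mpr hpi)
        · exact h4 i hqi (by omega)

lemma rfind_spec' (s sub : List Char) :
    (PySem.Chars.rfind s sub = -1 ∧ ∀ i ≤ s.length, ¬ sub <+: s.drop i) ∨
    (∃ q : Nat, PySem.Chars.rfind s sub = (q : Int) ∧ q ≤ s.length ∧ sub <+: s.drop q ∧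
      ∀ i, q < i → i ≤ s.length → ¬ sub <+: s.drop i) := by
  have h := rfind_go_spec s sub s.length
  have he : PySem.Chars.rfind s sub = PySem.Chars.rfind.go s sub s.length := rfl
  rwa [← he] at h

lemma bestBwd_mono (l : List Char) (ps : List (Int × List Char)) :
    ∀ b : Int × Int × Nat, ∃ c, ps.foldl (fstepB l) (some b) = some c ∧ b.1 ≤ c.1 := by
  induction ps with
  | nil => exact fun b => ⟨b, rfl, le_rfl⟩
  | cons dw ps ih =>
    intro b
    rw [List.foldl_cons, fstepB_some]
    by_cases hc : (PySem.Chars.rfind l dw.2 != -1 && decide (b.1 < PySem.Chars.rfind l dw.2)) = true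
    · rw [if_pos hc]
      obtain ⟨c, h1, h2⟩ := ih (PySem.Chars.rfind l dw.2, dw.1, dw.2.length)
      refine ⟨c, h1, ?_⟩
      simp only [Bool.and_eq_true, decide_eq_true_eq] at hc
      omega
    · rw [if_neg hc]
      exact ih b

lemma bestBwd_sound (l : List Char) (ps : List (Int × List Char))
    (hps : ∀ dw ∈ ps, 0 ≤ dw.1 ∧ dw.1 < 10 ∧ dw.2 = wd dw.1.toNat) :
    ∀ acc, (acc = none ∨ ∃ D : Nat, D < 10 ∧
        acc = some (PySem.Chars.rfind l (wd D), (D : Int), (wd D).length) ∧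
        PySem.Chars.rfind l (wd D) ≠ -1) →
      (ps.foldl (fstepB l) acc = none ∨ ∃ D : Nat, D < 10 ∧
        ps.foldl (fstepB l) acc = some (PySem.Chars.rfind l (wd D), (D : Int), (wd D).length) ∧
        PySem.Chars.rfind l (wd D) ≠ -1) := by
  induction ps with
  | nil => exact fun acc h => h
  | cons dw ps ih =>
    intro acc hacc
    rw [List.foldl_cons]
    apply ih (fun e he => hps e (by simp [he]))
    obtain ⟨h0, h10, hw⟩ := hps dw (by simp)
    have hD : dw.1 = ((dw.1.toNat : Nat) : Int) := by omega
    rcases hacc with rfl | ⟨D, hD10, rfl, hne⟩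
    · rw [fstepB_none]
      by_cases hc : (PySem.Chars.rfind l dw.2 != -1) = true
      · rw [if_pos hc]
        refine Or.inr ⟨dw.1.toNat, by omega, ?_, by rw [← hw]; simpa using hc⟩
        rw [← hw, ← hD]
      · rw [if_neg hc]
        exact Or.inl rfl
    · rw [fstepB_some]
      by_cases hc : (PySem.Chars.rfind l dw.2 != -1 &&
          decide (PySem.Chars.rfind l (wd D) < PySem.Chars.rfind l dw.2)) = true
      · rw [if_pos hc]
        simp only [Bool.and_eq_true, bne_iff_ne, ne_eq] at hc
        refine Or.inr ⟨dw.1.toNat, by omega, ?_, by rw [← hw]; exact hc.1⟩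
        rw [← hw, ← hD]
      · rw [if_neg hc]
        exact Or.inr ⟨D, hD10, rfl, hne⟩

lemma bestBwd_complete (l : List Char) (ps : List (Int × List Char)) :
    ∀ acc dw, dw ∈ ps → PySem.Chars.rfind l dw.2 ≠ -1 →
      ∃ c, ps.foldl (fstepB l) acc = some c ∧ PySem.Chars.rfind l dw.2 ≤ c.1 := by
  induction ps with
  | nil => intro _ _ h; exact absurd h (by simp)
  | cons e ps ih =>
    intro acc dw hdw hne
    rw [List.foldl_cons]
    rcases List.mem_cons.mp hdw with rfl | hdw'
    · cases acc with
      | none =>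
        rw [fstepB_none, if_pos (by simpa using hne)]
        obtain ⟨c, h1, h2⟩ := bestBwd_mono l ps (PySem.Chars.rfind l dw.2, dw.1, dw.2.length)
        exact ⟨c, h1, h2⟩
      | some b =>
        rw [fstepB_some]
        by_cases hc : (PySem.Chars.rfind l dw.2 != -1 &&
            decide (b.1 < PySem.Chars.rfind l dw.2)) = true
        · rw [if_pos hc]
          obtain ⟨c, h1, h2⟩ := bestBwd_mono l ps (PySem.Chars.rfind l dw.2, dw.1, dw.2.length)
          exact ⟨c, h1, h2⟩
        · rw [if_neg hc]
          simp only [Bool.and_eq_true, bne_iff_ne, ne_eq, decide_eq_true_eq, not_and, not_lt] at hc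
          obtain ⟨c, h1, h2⟩ := bestBwd_mono l ps b
          exact ⟨c, h1, by have := hc hne; omega⟩
    · exact ih _ dw hdw' hne

lemma bestBwd_some {l : List Char} {p dI : Int} {L : Nat}
    (h : bestBwdB l = some (p, dI, L)) :
    ∃ D : Nat, dI = (D : Int) ∧ D < 10 ∧ L = (wd D).length ∧ 0 ≤ p ∧
      pvMatchAt l p.toNat = some D ∧ ∀ q, p.toNat < q → pvMatchAt l q = none := by
  rw [bestBwdB_eq] at h
  have hsound := bestBwd_sound l (PySem.List.enumerate wordsA 0) enumB_spec none (Or.inl rfl)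
  rw [h] at hsound
  rcases hsound with hbad | ⟨D, hD10, heq, hne⟩
  · exact absurd hbad (by simp)
  · simp only [Option.some.injEq, Prod.mk.injEq] at heq
    obtain ⟨hp, hdI, hL⟩ := heq
    rcases rfind_spec' l (wd D) with ⟨h1, -⟩ | ⟨q, h1, hql, hpre, hmax⟩
    · exact absurd h1 hne
    · have hpq : p = (q : Int) := by rw [hp]; exact h1
      have h0p : 0 ≤ p := by omega
      have hqt : p.toNat = q := by omega
      refine ⟨D, hdI, hD10, hL, h0p, ?_, ?_⟩
      · rw [hqt]
        exact matchAt_of_prefix hD10 hpre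
      · intro q' hq'
        apply matchAt_none_iff.mpr
        intro w hw hpw
        obtain ⟨E, hE10, rfl⟩ := mem_wd w hw
        have hql' : q' < l.length := by
          by_contra hbig
          rw [List.drop_eq_nil_of_le (by omega), List.prefix_nil] at hpw
          exact words_ne_nil _ hw hpw
        rcases rfind_spec' l (wd E) with ⟨-, h2⟩ | ⟨qE, hE1, hEl, hEpre, hEmax⟩
        · exact h2 q' (by omega) hpw
        · have hqE : q' ≤ qE := by
            by_contra hlt
            exact hEmax q' (by omega) (by omega) hpw
          have hneE : PySem.Chars.rfind l (wd E) ≠ -1 := by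
            rw [hE1]
            omega
          obtain ⟨c, hc1, hc2⟩ := bestBwd_complete l (PySem.List.enumerate wordsA 0) none
            ((E : Int), wd E) (enum_mem E hE10) hneE
          rw [h] at hc1
          simp only [Option.some.injEq] at hc1
          have hcp : c.1 = p := by rw [← hc1]
          have hc2' : PySem.Chars.rfind l (wd E) ≤ c.1 := hc2
          rw [hE1] at hc2'
          omega

lemma bestBwd_none {l : List Char} (h : bestBwdB l = none) :
    ∀ q, pvMatchAt l q = none := by
  intro q
  apply matchAt_none_iff.mpr
  intro w hw hpw
  obtain ⟨E, hE10, rfl⟩ := mem_wd w hw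
  have hql : q < l.length := matchAt_lt_length (matchAt_of_prefix hE10 hpw)
  have hneE : PySem.Chars.rfind l (wd E) ≠ -1 := by
    rcases rfind_spec' l (wd E) with ⟨-, h2⟩ | ⟨qE, hE1, -, -, -⟩
    · exact absurd hpw (h2 q (by omega))
    · rw [hE1]; omega
  obtain ⟨c, hc1, -⟩ := bestBwd_complete l (PySem.List.enumerate wordsA 0) none
    ((E : Int), wd E) (enum_mem E hE10) hneE
  rw [bestBwdB_eq] at h
  rw [h] at hc1
  exact absurd hc1 (by simp)

-- bridges to firstFrom / lastIn ----------------------------------------------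
lemma firstFrom_eq_some {l : List Char} {p D : Nat} (hm : pvMatchAt l p = some D)
    (hmin : ∀ q < p, pvMatchAt l q = none) : firstFrom l 0 = some (p, D) := by
  have hpl : p < l.length := matchAt_lt_length hm
  suffices H : ∀ n s, p - s = n → s ≤ p → firstFrom l s = some (p, D) by
    exact H p 0 rfl (by omega)
  intro n
  induction n with
  | zero =>
    intro s hn hs
    have : s = p := by omega
    subst this
    rw [firstFrom_step (by omega), hm]
  | succ n ih =>
    intro s hn hs
    rw [firstFrom_step (by omega), hmin s (by omega)]
    exact ih (s + 1) (by omega) (by omega)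

lemma firstFrom_eq_none {l : List Char} (h : ∀ q, pvMatchAt l q = none) (s : Nat) :
    firstFrom l s = none := by
  obtain ⟨n, hn⟩ : ∃ n, l.length - s = n := ⟨_, rfl⟩
  induction n generalizing s with
  | zero => rw [firstFrom_stop (by omega)]
  | succ n ih =>
    rw [firstFrom_step (by omega), h s]
    exact ih (s + 1) (by omega)

lemma lastIn_eq_some {l : List Char} {p D : Nat} (h1 : 1 ≤ p) (hm : pvMatchAt l p = some D)
    (hmax : ∀ q, p < q → pvMatchAt l q = none) :
    ∀ h, p ≤ h → lastIn l h = some (p, D) := by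
  intro hh
  induction hh with
  | zero => intro hph; omega
  | succ hh ih =>
    intro hph
    rcases Nat.eq_or_lt_of_le hph with rfl | hlt
    · rw [lastIn, hm]
    · rw [lastIn, hmax (hh + 1) (by omega)]
      exact ih (by omega)

lemma lastIn_eq_none {l : List Char} (h : ∀ q, 1 ≤ q → pvMatchAt l q = none) :
    ∀ hh, lastIn l hh = none := by
  intro hh
  induction hh with
  | zero => rfl
  | succ hh ih =>
    rw [lastIn, h (hh + 1) (by omega)]
    exact ih

-- length facts about cspec ---------------------------------------------------
lemma spl_cspec_len {l : List Char} {k t : Nat} (ht : t < 10)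
    (hm : (wd t).isPrefixOf (l.drop (l.length - k))) (hk1 : 1 ≤ k) (h0 : NM0 l) :
    (l.take (l.length - k) ++ PySem.Int.toChars (t : Int)
      ++ l.drop (l.length - k + (wd t).length)).length + (wd t).length = l.length + 1 := by
  have hm' := List.isPrefixOf_iff_prefix.mp hm
  have hkl : k < l.length := by
    by_contra hkl
    rw [show l.length - k = 0 from by omega, List.drop_zero] at hm'
    exact h0 _ (wd_mem t ht) hm'
  have hL : (wd t).length ≤ k := by
    have := hm'.length_le
    rw [List.length_drop] at this
    omega
  obtain ⟨hlen, -⟩ := toChars_digit t ht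
  simp only [List.length_append, hlen, List.length_take, List.length_drop]
  omega

lemma cspec_len_le : ∀ n t l k, 10 - t = n → NM0 l → 1 ≤ k →
    (cspec l k t).length ≤ l.length := by
  intro n
  induction n with
  | zero =>
    intro t l k hn h0 hk
    rw [cspec_stop (by omega)]
  | succ n ih =>
    intro t l k hn h0 hk
    have ht : t < 10 := by omega
    by_cases hm : (wd t).isPrefixOf (l.drop (l.length - k))
    · rw [cspec_hit ht hm]
      have hlen := spl_cspec_len ht hm hk h0
      have h0' : NM0 (l.take (l.length - k) ++ PySem.Int.toChars (t : Int)
          ++ l.drop (l.length - k + (wd t).length)) := by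
        have hm' := List.isPrefixOf_iff_prefix.mp hm
        have hkl : k < l.length := by
          by_contra hkl
          rw [show l.length - k = 0 from by omega, List.drop_zero] at hm'
          exact h0 _ (wd_mem t ht) hm'
        exact nm0_splice h0 ht (by omega) (by omega)
      have := ih (t + 1) _ k (by omega) h0' hk
      have hL := wd_len_ge t ht
      omega
    · rw [cspec_miss ht hm]
      exact ih (t + 1) l k (by omega) h0 hk

lemma cspec_len_lt : ∀ n t l k, 10 - t = n → NM0 l → 1 ≤ k →
    (∃ e, t ≤ e ∧ e < 10 ∧ (wd e).isPrefixOf (l.drop (l.length - k))) →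
    (cspec l k t).length < l.length := by
  intro n
  induction n with
  | zero =>
    intro t l k hn h0 hk he
    obtain ⟨e, he1, he2, -⟩ := he
    omega
  | succ n ih =>
    intro t l k hn h0 hk he
    obtain ⟨e, he1, he2, he3⟩ := he
    have ht : t < 10 := by omega
    by_cases hm : (wd t).isPrefixOf (l.drop (l.length - k))
    · rw [cspec_hit ht hm]
      have hlen := spl_cspec_len ht hm hk h0
      have h0' : NM0 (l.take (l.length - k) ++ PySem.Int.toChars (t : Int)
          ++ l.drop (l.length - k + (wd t).length)) := by
        have hm' := List.isPrefixOf_iff_prefix.mp hm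
        have hkl : k < l.length := by
          by_contra hkl
          rw [show l.length - k = 0 from by omega, List.drop_zero] at hm'
          exact h0 _ (wd_mem t ht) hm'
        exact nm0_splice h0 ht (by omega) (by omega)
      have := cspec_len_le (10 - (t + 1)) (t + 1) _ k rfl h0' hk
      have hL := wd_len_ge t ht
      omega
    · rw [cspec_miss ht hm]
      apply ih (t + 1) l k (by omega) h0 hk
      refine ⟨e, ?_, he2, he3⟩
      rcases Nat.eq_or_lt_of_le he1 with rfl | h
      · exact absurd he3 hm
      · omega

-- the common shape of both results ------------------------------------------
-- forward halves agree, and D_convert's l1 is exactly that common line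
lemma fwd_common (l0 : List Char) :
    (fwdPassA l0).1 = (match bestFwdB l0 with
      | none => l0
      | some (p, d, L) => spliceB l0 p d L)
    ∧ (fwdPassA l0).1 = (match firstFrom l0 0 with | none => l0 | some (p, d) => spl l0 p d)
    ∧ NM0 (fwdPassA l0).1 ∨
    (∀ q, pvMatchAt l0 q = none) ∧ (fwdPassA l0).1 = l0
      ∧ (fwdPassA l0).1 = (match bestFwdB l0 with
        | none => l0
        | some (p, d, L) => spliceB l0 p d L)
      ∧ (fwdPassA l0).1 = (match firstFrom l0 0 with | none => l0 | some (p, d) => spl l0 p d) := by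
  cases hf : bestFwdB l0 with
  | none =>
    right
    have hnone := bestFwd_none hf
    have hffn : firstFrom l0 0 = none := firstFrom_eq_none hnone 0
    have hA1 : (fwdPassA l0).1 = l0 := by rw [fwdPassA_eq, hffn]
    exact ⟨hnone, hA1, by rw [hA1], by rw [hA1, hffn]⟩
  | some pdl =>
    left
    obtain ⟨p, dI, L⟩ := pdl
    obtain ⟨D, rfl, hD10, rfl, h0p, hma, hmin⟩ := bestFwd_some hf
    have hff : firstFrom l0 0 = some (p.toNat, D) := firstFrom_eq_some hma hmin
    have hA1 : (fwdPassA l0).1 = spl l0 p.toNat D := by rw [fwdPassA_eq, hff]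
    have hB1 : spliceB l0 p ((D : Nat) : Int) (wd D).length = spl l0 p.toNat D := by
      rw [spliceB, spl, PySem.List.slice_to l0 h0p]
      rw [PySem.List.slice_from l0 (by omega : (0 : Int) ≤ p + ((wd D).length : Int))]
      rw [show (p + ((wd D).length : Int)).toNat = p.toNat + (wd D).length from by omega]
    refine ⟨by rw [hA1]; exact hB1.symm, by rw [hA1, hff], ?_⟩
    rw [hA1]
    exact nm0_spl hma hmin

-- main assembly: both final results, phrased over the common l1 --------------
lemma main_shape (line : String) :
    ∃ l1 : List Char, NM0 l1
      ∧ l1 = pvLine1 line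
      ∧ ((lastIn l1 (l1.length - 1) = none ∧ convert line = String.ofList l1
            ∧ convert_alt line = String.ofList l1)
        ∨ (∃ p d, lastIn l1 (l1.length - 1) = some (p, d) ∧ 1 ≤ p ∧ p < l1.length ∧ d < 10
            ∧ (wd d).isPrefixOf (l1.drop p)
            ∧ convert line = String.ofList (cspec l1 (l1.length - p) d)
            ∧ convert_alt line = String.ofList (spl l1 p d))) := by
  set l0 := line.toList with hl0
  have hNM0 : NM0 (fwdPassA l0).1 ∧
      (fwdPassA l0).1 = (match bestFwdB l0 with
        | none => l0 | some (p, d, L) => spliceB l0 p d L) ∧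
      (fwdPassA l0).1 = (match firstFrom l0 0 with | none => l0 | some (p, d) => spl l0 p d) := by
    rcases fwd_common l0 with ⟨h1, h2, h3⟩ | ⟨hn, hA, h1, h2⟩
    · exact ⟨h3, h1, h2⟩
    · refine ⟨?_, h1, h2⟩
      rw [hA]
      exact NM0_iff.mpr (hn 0)
  obtain ⟨h0, hBfwd, hAfwd⟩ := hNM0
  refine ⟨(fwdPassA l0).1, h0, by unfold pvLine1; rw [← hl0]; exact hAfwd, ?_⟩
  set l1 := (fwdPassA l0).1 with hl1
  cases hb : bestBwdB l1 with
  | none =>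
    left
    have hlin : lastIn l1 (l1.length - 1) = none :=
      lastIn_eq_none (fun q _ => bestBwd_none hb q) _
    refine ⟨hlin, ?_, ?_⟩
    · show String.ofList (bwdPassA (fwdPassA line.toList).1).1 = _
      rw [← hl0, ← hl1, bwdPassA_eq l1 h0, hlin]
    · show String.ofList (match bestBwdB (match bestFwdB line.toList with
        | none => line.toList | some (p, d, L) => spliceB line.toList p d L) with
        | none => _ | some (p, d, L) => _) = _
      rw [← hl0, ← hBfwd, hb]
  | some pdl =>
    right
    obtain ⟨p2, dI2, L2⟩ := pdl
    obtain ⟨D2, rfl, hD2, rfl, h0p2, hma2, hmax2⟩ := bestBwd_some hb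
    obtain ⟨-, hpre2, -⟩ := matchAt_some hma2
    have hp21 : 1 ≤ p2.toNat := by
      rcases Nat.eq_zero_or_pos p2.toNat with hz | hp
      · rw [hz] at hma2
        rw [NM0_iff] at h0
        rw [h0] at hma2
        exact absurd hma2 (by simp)
      · exact hp
    have hp2len : p2.toNat < l1.length := matchAt_lt_length hma2
    have hlin : lastIn l1 (l1.length - 1) = some (p2.toNat, D2) :=
      lastIn_eq_some hp21 hma2 hmax2 (l1.length - 1) (by omega)
    refine ⟨p2.toNat, D2, hlin, hp21, hp2len, hD2,
      List.isPrefixOf_iff_prefix.mpr hpre2, ?_, ?_⟩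
    · show String.ofList (bwdPassA (fwdPassA line.toList).1).1 = _
      rw [← hl0, ← hl1, bwdPassA_eq l1 h0, hlin]
    · show String.ofList (match bestBwdB (match bestFwdB line.toList with
        | none => line.toList | some (p, d, L) => spliceB line.toList p d L) with
        | none => _ | some (p, d, L) => spliceB _ p d L) = _
      rw [← hl0, ← hBfwd, hb]
      show String.ofList (spliceB l1 p2 ((D2 : Nat) : Int) (wd D2).length) = _
      have hB2 : spliceB l1 p2 ((D2 : Nat) : Int) (wd D2).length = spl l1 p2.toNat D2 := by
        rw [spliceB, spl, PySem.List.slice_to l1 h0p2]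
        rw [PySem.List.slice_from l1 (by omega : (0 : Int) ≤ p2 + ((wd D2).length : Int))]
        rw [show (p2 + ((wd D2).length : Int)).toNat = p2.toNat + (wd D2).length from by omega]
      rw [hB2]

-- D_convert read through main_shape's l1 -------------------------------------
lemma pvMatch_eq (l : List Char) : pvMatch l = pvMatchAt l 0 := rfl

lemma pvMatchAt_nil (q : Nat) : pvMatchAt [] q = none := by
  apply matchAt_none_iff.mpr
  intro w hw hp
  rw [List.drop_nil, List.prefix_nil] at hp
  exact words_ne_nil w hw hp

lemma pvMatchAt_cons (c : Char) (r : List Char) (q : Nat) :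
    pvMatchAt (c :: r) (q + 1) = pvMatchAt r q := rfl

lemma pvMatchAt_big {l : List Char} {q : Nat} (h : l.length ≤ q) : pvMatchAt l q = none := by
  cases hma : pvMatchAt l q with
  | none => rfl
  | some d => exact absurd (matchAt_lt_length hma) (by omega)

lemma pvFirstGo_none : ∀ (l : List Char) (i : Nat), (∀ q, pvMatchAt l q = none) →
    pvFirstGo i l = none := by
  intro l
  induction l with
  | nil => intro i _; rfl
  | cons c r ih =>
    intro i h
    rw [pvFirstGo, pvMatch_eq, h 0]
    exact ih (i + 1) (fun q => by rw [← pvMatchAt_cons c]; exact h (q + 1))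

lemma pvFirstGo_hit : ∀ (l : List Char) (i p : Nat) (d : Nat), pvMatchAt l p = some d →
    (∀ q < p, pvMatchAt l q = none) → pvFirstGo i l = some (i + p, d) := by
  intro l
  induction l with
  | nil => intro i p d hm _; rw [pvMatchAt_nil] at hm; exact absurd hm (by simp)
  | cons c r ih =>
    intro i p d hm hmin
    cases p with
    | zero => simp only [pvFirstGo, pvMatch_eq, hm, Nat.add_zero]
    | succ p =>
      rw [pvFirstGo, pvMatch_eq, hmin 0 (by omega)]
      rw [show i + (p + 1) = (i + 1) + p from by omega]
      exact ih (i + 1) p d (by rw [← pvMatchAt_cons c]; exact hm)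
        (fun q hq => by rw [← pvMatchAt_cons c]; exact hmin (q + 1) (by omega))

lemma pvLastGo_none : ∀ (l : List Char) (best : Option (Nat × Nat)) (i : Nat),
    (∀ q, pvMatchAt l q = none) → pvLastGo best i l = best := by
  intro l
  induction l with
  | nil => intro best i _; rfl
  | cons c r ih =>
    intro best i h
    rw [pvLastGo, pvMatch_eq, h 0]
    exact ih best (i + 1) (fun q => by rw [← pvMatchAt_cons c]; exact h (q + 1))

lemma pvLastGo_hit : ∀ (l : List Char) (best : Option (Nat × Nat)) (i p : Nat) (d : Nat),
    pvMatchAt l p = some d → (∀ q, p < q → pvMatchAt l q = none) →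
    pvLastGo best i l = some (i + p, d) := by
  intro l
  induction l with
  | nil => intro best i p d hm _; rw [pvMatchAt_nil] at hm; exact absurd hm (by simp)
  | cons c r ih =>
    intro best i p d hm hmax
    cases p with
    | zero =>
      rw [pvLastGo, pvMatch_eq, hm, Nat.add_zero]
      exact pvLastGo_none r _ (i + 1)
        (fun q => by rw [← pvMatchAt_cons c]; exact hmax (q + 1) (by omega))
    | succ p =>
      rw [pvLastGo]
      rw [show i + (p + 1) = (i + 1) + p from by omega]
      exact ih _ (i + 1) p d (by rw [← pvMatchAt_cons c]; exact hm)
        (fun q hq => by rw [← pvMatchAt_cons c]; exact hmax (q + 1) (by omega))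

lemma pvFirst_eq (l : List Char) : pvFirstGo 0 l = firstFrom l 0 := by
  by_cases hex : ∀ q, pvMatchAt l q = none
  · rw [pvFirstGo_none l 0 hex, firstFrom_eq_none hex]
  · push_neg at hex
    have hp := Nat.find_spec hex
    set p := Nat.find hex with hpdef
    have hmin : ∀ q < p, pvMatchAt l q = none := by
      intro q hq
      have := Nat.find_min hex hq
      simpa using this
    cases hd : pvMatchAt l p with
    | none => exact absurd hd hp
    | some d => rw [pvFirstGo_hit l 0 p d hd hmin, Nat.zero_add, firstFrom_eq_some hd hmin]

lemma pvLast_lastIn {l : List Char} (h0 : NM0 l) :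
    pvLastGo none 0 l = lastIn l (l.length - 1) := by
  by_cases hex : ∀ q, pvMatchAt l q = none
  · rw [pvLastGo_none l none 0 hex, lastIn_eq_none (fun q _ => hex q)]
  · push_neg at hex
    set p := Nat.findGreatest (fun q => pvMatchAt l q ≠ none) l.length with hpdef
    obtain ⟨q0, hq0⟩ := hex
    have hq0l : q0 ≤ l.length := by
      cases hma : pvMatchAt l q0 with
      | none => exact absurd hma hq0
      | some d => have := matchAt_lt_length hma; omega
    have hP : pvMatchAt l p ≠ none := by
      have := Nat.findGreatest_spec (P := fun q => pvMatchAt l q ≠ none) (m := q0) hq0l hq0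
      rw [← hpdef] at this
      exact this
    have hmax : ∀ q, p < q → pvMatchAt l q = none := by
      intro q hq
      by_cases hql : q ≤ l.length
      · have := Nat.findGreatest_is_greatest (hpdef ▸ hq) hql
        simpa using this
      · exact pvMatchAt_big (by omega)
    cases hd : pvMatchAt l p with
    | none => exact absurd hd hP
    | some d =>
      have hp1 : 1 ≤ p := by
        rcases Nat.eq_zero_or_pos p with hz | h
        · rw [hz] at hd
          rw [NM0_iff.mp h0] at hd
          exact absurd hd (by simp)
        · exact h
      have hpl : p < l.length := matchAt_lt_length hd
      rw [pvLastGo_hit l none 0 p d hd hmax, Nat.zero_add,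
        lastIn_eq_some hp1 hd hmax (l.length - 1) (by omega)]

set_option maxRecDepth 4000 in
lemma mem_drop_lt : ∀ d < 10, ∀ e < 10, wd e ∈ wordsA.drop (d + 1) → d < e := by decide

set_option maxRecDepth 4000 in
lemma wd_mem_drop : ∀ d < 9, ∀ e < 10, d < e → wd e ∈ wordsA.drop (d + 1) := by decide

lemma drop_any_iff (d : Nat) (T : List Char) :
    (wordsA.drop (d + 1)).any (·.isPrefixOf T) = true ↔
      ∃ e, d < e ∧ e < 10 ∧ (wd e).isPrefixOf T := by
  constructor
  · intro h
    obtain ⟨w, hw, hp⟩ := List.any_eq_true.mp h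
    have hd10 : d < 10 := by
      by_contra hd
      rw [List.drop_eq_nil_of_le (by simp [wordsA]; omega)] at hw
      exact absurd hw (by simp)
    obtain ⟨e, he10, rfl⟩ := mem_wd w (List.drop_subset (d + 1) wordsA hw)
    exact ⟨e, mem_drop_lt d hd10 e he10 hw, he10, hp⟩
  · rintro ⟨e, he1, he2, he3⟩
    exact List.any_eq_true.mpr ⟨wd e, wd_mem_drop d (by omega) e he2 he1, he3⟩

lemma D_iff (line : String) (l1 : List Char) (hl1 : l1 = pvLine1 line) (h0 : NM0 l1) :
    D_convert line ↔ (match lastIn l1 (l1.length - 1) with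
      | none => False
      | some (p, d) => ∃ e, d < e ∧ e < 10 ∧
          (wd e).isPrefixOf ((spl l1 p d).drop ((spl l1 p d).length - (l1.length - p)))) := by
  have hElim : (pvFirstGo 0 line.toList).elim line.toList (pvSpl line.toList) = l1 := by
    rw [pvFirst_eq, hl1]
    unfold pvLine1
    cases firstFrom line.toList 0 with
    | none => rfl
    | some pd => rfl
  unfold D_convert
  simp only [hElim]
  rw [pvLast_lastIn h0]
  cases lastIn l1 (l1.length - 1) with
  | none => simp
  | some pd =>
    obtain ⟨p, d⟩ := pd
    simp only [Option.any_some]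
    exact drop_any_iff d _

-- splice bookkeeping for the cascade offset ----------------------------------
lemma spl_off (l1 : List Char) (p d : Nat) (hp : p < l1.length) :
    spl l1 p d = l1.take (l1.length - (l1.length - p)) ++ PySem.Int.toChars (d : Int)
        ++ l1.drop (l1.length - (l1.length - p) + (wd d).length) := by
  rw [show l1.length - (l1.length - p) = p from by omega]
  rfl

-- ===== VERDICT (by name: the statements are the Claim_ definitions above) =====
theorem convert_spec : Claim_unchanged_convert := by
  intro line _
  intro hnD
  obtain ⟨l1, h0, hl1, hcase⟩ := main_shape line
  rcases hcase with ⟨hlin, hA, hB⟩ | ⟨p, d, hlin, hp1, hpl, hd, hpre, hA, hB⟩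
  · rw [hA, hB]
  · rw [hA, hB]
    rw [D_iff line l1 hl1 h0, hlin] at hnD
    push_neg at hnD
    -- A's cascade: one hit at index d, then no later word matches
    have hk1 : 1 ≤ l1.length - p := by omega
    have hpre' : (wd d).isPrefixOf (l1.drop (l1.length - (l1.length - p))) := by
      rw [show l1.length - (l1.length - p) = p from by omega]
      exact hpre
    rw [cspec_hit hd hpre']
    rw [← spl_off l1 p d hpl]
    rw [cspec_skip (d + 1) 10 (by omega) le_rfl ?_, cspec_stop le_rfl]
    intro v hv1 hv2 hpv
    exact hnD v (by omega) hv2 hpv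

theorem convert_changed : Claim_changed_convert := by
  unfold Claim_changed_convert
  decide

theorem convert_tight : Claim_exact_convert := by
  intro line _ hD
  obtain ⟨l1, h0, hl1, hcase⟩ := main_shape line
  rw [D_iff line l1 hl1 h0] at hD
  rcases hcase with ⟨hlin, hA, hB⟩ | ⟨p, d, hlin, hp1, hpl, hd, hpre, hA, hB⟩
  · rw [hlin] at hD
    exact absurd hD (by simp)
  · rw [hlin] at hD
    obtain ⟨e, he1, he2, he3⟩ := hD
    rw [hA, hB]
    intro hEq
    -- lengths: A's cascade result is strictly shorter than B's single splice
    have hk1 : 1 ≤ l1.length - p := by omega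
    have hpre' : (wd d).isPrefixOf (l1.drop (l1.length - (l1.length - p))) := by
      rw [show l1.length - (l1.length - p) = p from by omega]
      exact hpre
    rw [cspec_hit hd hpre'] at hEq
    rw [← spl_off l1 p d hpl] at hEq
    have h0' : NM0 (spl l1 p d) := by
      unfold spl
      exact nm0_splice h0 hd hp1 (by omega)
    have hlt : (cspec (spl l1 p d) (l1.length - p) (d + 1)).length < (spl l1 p d).length := by
      apply cspec_len_lt (10 - (d + 1)) (d + 1) _ _ rfl h0' hk1
      exact ⟨e, by omega, he2, he3⟩
    have := congrArg (fun s => s.toList.length) hEq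
    simp only [String.toList_ofList] at this
    omega
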